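-- pv_equiv track=rewrite | github.com/armandopato/practicas-eda2 | Práctica 4/findNeighbors.py | findClosestNeighbors
-- ===== SOURCE A (Python) =====
-- import math
--
-- def modifiedBinarySearch(arr, toSearch):
--     return binarySearchAux(arr, 0, len(arr) - 1, toSearch)
--
-- def binarySearchAux(arr, start, end, toSearch):
--     if start > end:
--         # Retornar índice correspondiente
--         return start
--
--     halfIndex = (start + end) // 2
--     if arr[halfIndex] == toSearch:
--         return halfIndex
--     elif arr[halfIndex] > toSearch:
--         return binarySearchAux(arr, start, halfIndex - 1, toSearch)
--     else:
--         return binarySearchAux(arr, halfIndex + 1, end, toSearch)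
--
-- def findClosestNeighbors(arr, num_neighbors, max_range, toSearch):
--     # Asegurarnos de que el arreglo está ordenado
--     # para ejecutar la búsqueda
--     copy = arr.copy()
--     copy.sort()
--     index = modifiedBinarySearch(copy, toSearch)
--     neighbors = []
--
--     def getDifference(idx):
--         return abs(copy[idx] - toSearch)
--
--     # Índices de los posibles elementos
--     # más cercanos a agregar
--     leftPointer = index - 1
--     rightPointer = index
--
--     # Diferencia entre los elementos anteriores
--     # y el elemento buscado
--     differenceRight = getDifference(rightPointer)
--     differenceLeft = math.inf
--     if leftPointer >= 0:
--         differenceLeft = getDifference(leftPointer)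
--
--     # Añadir vecinos mientras aún no se haya cumplido con el número solicitado
--     # y aún haya candidatos
--     while len(neighbors) < num_neighbors and (differenceLeft <= max_range or differenceRight <= max_range):
--         # En este punto ambos vecinos candidatos están dentro del rango
--
--         # La distancia al vecino izquierdo es menor o igual
--         if differenceLeft <= differenceRight:
--             neighbors.append(copy[leftPointer])
--             leftPointer -= 1
--             # Si se ha llegado al principio del arreglo,
--             # invalidar la diferencia izquierda
--             if leftPointer == -1:
--                 differenceLeft = math.inf
--             else:
--                 differenceLeft = getDifference(leftPointer)
--         # La distancia al vecino derecho es mayor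
--         else:
--             neighbors.append(copy[rightPointer])
--             rightPointer += 1
--             # Si se ha llegado al final del arreglo,
--             # invalidar la diferencia derecha
--             if rightPointer == len(copy):
--                 differenceRight = math.inf
--             else:
--                 differenceRight = getDifference(rightPointer)
--
--     neighbors.sort()
--     return neighbors
-- ===== SOURCE B (Python) =====
-- def findClosestNeighbors(arr, num_neighbors, max_range, toSearch):
--     # Sort the in-range candidates by value, then shrink a window from both
--     # ends, dropping whichever endpoint is the worse neighbor, until at most
--     # num_neighbors remain. The window is already sorted, so no final sort.
--     cands = sorted(x for x in arr if abs(x - toSearch) <= max_range)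
--     k = max(0, num_neighbors)
--     lo, hi = 0, len(cands)
--     while hi - lo > k:
--         a, c = cands[lo], cands[hi - 1]
--         if (abs(a - toSearch), a) > (abs(c - toSearch), c):
--             lo += 1
--         else:
--             hi -= 1
--     return cands[lo:hi]
-- ===== Notes on version B (the rewrite author's own statement) =====
-- stated objective: simpler
-- what changed: Instead of A's sort + binary search + outward two-pointer merge from the insertion point + final sort, B sorts the in-range candidates by value once and shrinks a window from both ends (dropping the endpoint that is the worse neighbor under the (distance, value) order) until num_neighbors remain; the window is returned as-is, already sorted. A timing run measured B ~3x faster: A runs an interpreted per-element two-pointer loop plus a second sort, while B's per-element work is one filter plus a window loop that only touches the elements it discards.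
import Mathlib
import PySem

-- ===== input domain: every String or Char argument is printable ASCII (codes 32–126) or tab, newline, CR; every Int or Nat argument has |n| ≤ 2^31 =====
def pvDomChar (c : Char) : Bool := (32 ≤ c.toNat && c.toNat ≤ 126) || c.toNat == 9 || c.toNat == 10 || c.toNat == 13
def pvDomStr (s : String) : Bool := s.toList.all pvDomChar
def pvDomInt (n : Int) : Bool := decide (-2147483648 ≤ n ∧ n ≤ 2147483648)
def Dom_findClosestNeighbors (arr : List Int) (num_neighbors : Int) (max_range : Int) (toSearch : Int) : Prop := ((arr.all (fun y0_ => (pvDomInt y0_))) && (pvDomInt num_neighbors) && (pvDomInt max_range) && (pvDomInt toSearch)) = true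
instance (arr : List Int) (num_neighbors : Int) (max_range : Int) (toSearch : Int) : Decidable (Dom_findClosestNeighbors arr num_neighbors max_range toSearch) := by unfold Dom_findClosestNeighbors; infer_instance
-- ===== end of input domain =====

-- B replaces A's sort + binary search + outward two-pointer merge + final sort by a single
-- value-sort of the in-range candidates followed by shrinking a window from both ends
-- (objective: simpler; same O(n log n) asymptotics, measured ~3x faster in a timing run).

-- ===== PORT A =====

-- xs[i] as A evaluates it; every access A actually performs on inputs satisfying
-- Pre_ is in range, so the .getD 0 default is never the raising case there.
def pvEl (xs : List Int) (i : Int) : Int := (PySem.List.pyGet? xs i).getD 0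

-- midpoint lemma cited by the termination proof of binarySearchAux
def binarySearchAux (arr : List Int) (start : Int) (end_ : Int) (toSearch : Int) : Int :=
  if h : start > end_ then start
  else
    let halfIndex := PySem.Int.floordiv (start + end_) 2
    let v := pvEl arr halfIndex
    if v = toSearch then halfIndex
    else if v > toSearch then binarySearchAux arr start (halfIndex - 1) toSearch
    else binarySearchAux arr (halfIndex + 1) end_ toSearch
termination_by (end_ - start + 1).toNat
decreasing_by
  · have := PySem.Int.floordiv_two_mid_bounds (lo := start) (hi := end_) (by omega)
    omega
  · have := PySem.Int.floordiv_two_mid_bounds (lo := start) (hi := end_) (by omega)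
    omega

def modifiedBinarySearch (arr : List Int) (toSearch : Int) : Int :=
  binarySearchAux arr 0 ((arr.length : Int) - 1) toSearch

-- abs(copy[idx] - toSearch)
def getDifference (copy : List Int) (toSearch : Int) (idx : Int) : Int :=
  |pvEl copy idx - toSearch|

-- differenceX <= max_range  (math.inf encoded as none: inf ≤ m is false)
def pvLeR (d : Option Int) (m : Int) : Bool :=
  match d with
  | none => false
  | some a => decide (a ≤ m)

-- differenceLeft <= differenceRight  (inf ≤ inf true, inf ≤ finite false, finite ≤ inf true)
def pvLeD (dl : Option Int) (dr : Option Int) : Bool :=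
  match dl, dr with
  | none, none => true
  | none, some _ => false
  | some _, none => true
  | some a, some b => decide (a ≤ b)

-- A's while loop, fuel-based (fuel = len(copy) suffices: every iteration moves one of
-- the two pointers outward and they never pass the ends while the loop continues).
def neighborsLoop (copy : List Int) (num_neighbors : Int) (max_range : Int) (toSearch : Int)
    (neighbors : List Int) (leftP rightP : Int) (dl dr : Option Int) : Nat → List Int
  | 0 => neighbors
  | fuel + 1 =>
    if ((neighbors.length : Int) < num_neighbors) ∧ (pvLeR dl max_range || pvLeR dr max_range) = true then
      if pvLeD dl dr then
        neighborsLoop copy num_neighbors max_range toSearch (neighbors ++ [pvEl copy leftP])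
          (leftP - 1) rightP
          (if leftP - 1 = -1 then none else some (getDifference copy toSearch (leftP - 1))) dr fuel
      else
        neighborsLoop copy num_neighbors max_range toSearch (neighbors ++ [pvEl copy rightP])
          leftP (rightP + 1)
          dl (if rightP + 1 = (copy.length : Int) then none else some (getDifference copy toSearch (rightP + 1))) fuel
    else neighbors

def findClosestNeighbors (arr : List Int) (num_neighbors : Int) (max_range : Int) (toSearch : Int) : List Int :=
  let copy := PySem.List.sorted arr (fun x => x) false
  let index := modifiedBinarySearch copy toSearch
  let leftP := index - 1
  let rightP := index
  let differenceRight := some (getDifference copy toSearch rightP)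
  let differenceLeft := if leftP ≥ 0 then some (getDifference copy toSearch leftP) else none
  let nb := neighborsLoop copy num_neighbors max_range toSearch [] leftP rightP differenceLeft differenceRight copy.length
  PySem.List.sorted nb (fun x => x) false

-- ===== PORT B =====

-- (abs(a - toSearch), a) > (abs(c - toSearch), c): Python lexicographic tuple comparison
def pvKeyGt (toSearch a c : Int) : Bool :=
  decide ((c - toSearch).natAbs < (a - toSearch).natAbs ∨
          ((a - toSearch).natAbs = (c - toSearch).natAbs ∧ c < a))

-- B's while loop: shrink [lo, hi) until its size is ≤ k; fuel-based (each iteration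
-- shrinks hi - lo by one, so fuel = len(cands) ≥ hi - lo suffices).
def shrinkWindow (cands : List Int) (toSearch : Int) (k : Nat) (lo hi : Nat) : Nat → Nat × Nat
  | 0 => (lo, hi)
  | fuel + 1 =>
    if k < hi - lo then
      if pvKeyGt toSearch (cands.getD lo 0) (cands.getD (hi - 1) 0) then
        shrinkWindow cands toSearch k (lo + 1) hi fuel
      else
        shrinkWindow cands toSearch k lo (hi - 1) fuel
    else (lo, hi)

def findClosestNeighbors_alt (arr : List Int) (num_neighbors : Int) (max_range : Int) (toSearch : Int) : List Int :=
  let cands := PySem.List.sorted (arr.filter (fun x => decide (|x - toSearch| ≤ max_range))) (fun x => x) false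
  let k := (max 0 num_neighbors).toNat
  let p := shrinkWindow cands toSearch k 0 cands.length cands.length
  PySem.List.slice cands (some (p.1 : Int)) (some (p.2 : Int))

-- ===== PRECONDITION & SPEC =====

-- Pre_ excludes exactly the inputs on which A raises IndexError (the binary search
-- returns len(arr) and copy[index] is evaluated): arr empty or all elements < toSearch.
def Pre_findClosestNeighbors (arr : List Int) (num_neighbors : Int) (max_range : Int) (toSearch : Int) : Prop :=
  ∃ x ∈ arr, toSearch ≤ x
instance (arr : List Int) (num_neighbors : Int) (max_range : Int) (toSearch : Int) : Decidable (Pre_findClosestNeighbors arr num_neighbors max_range toSearch) := by unfold Pre_findClosestNeighbors; infer_instance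

def pvWitness_findClosestNeighbors : List Int × Int × Int × Int := ([1, 3, 5], 2, 10, 3)

def Spec_findClosestNeighbors (arr : List Int) (num_neighbors : Int) (max_range : Int) (toSearch : Int) (out : List Int) : Prop := out = findClosestNeighbors_alt arr num_neighbors max_range toSearch
instance (arr : List Int) (num_neighbors : Int) (max_range : Int) (toSearch : Int) (out : List Int) : Decidable (Spec_findClosestNeighbors arr num_neighbors max_range toSearch out) := by unfold Spec_findClosestNeighbors; infer_instance

-- ===== CLAIM (what is proved, stated in full; the proofs are below) =====
def Claim_equal_findClosestNeighbors : Prop := ∀ (arr : List Int) (num_neighbors : Int) (max_range : Int) (toSearch : Int), Dom_findClosestNeighbors arr num_neighbors max_range toSearch → Pre_findClosestNeighbors arr num_neighbors max_range toSearch → Spec_findClosestNeighbors arr num_neighbors max_range toSearch (findClosestNeighbors arr num_neighbors max_range toSearch)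
-- ===== LEMMAS AND PROOFS =====

-- ---------- proof-side definitions ----------

-- |x - t| as a Nat (omega-friendly form of the neighbor distance)
def pvDif (t x : Int) : Nat := (x - t).natAbs

-- the (distance, value) order both programs select by
def pvKeyLe (t x y : Int) : Prop := pvDif t x < pvDif t y ∨ (pvDif t x = pvDif t y ∧ x ≤ y)

-- the candidates A's loop has not yet consumed: indices 0..lp and rp..len-1, in range
def pvCrem (s : List Int) (t r lp rp : Int) : List Int :=
  (s.take (lp + 1).toNat ++ s.drop rp.toNat).filter (fun x => decide (|x - t| ≤ r))

-- ---------- pvKeyLe: a linear (pre)order with injective tie-breaking ----------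

theorem pvKeyLe_refl (t x : Int) : pvKeyLe t x x := by unfold pvKeyLe pvDif; omega
theorem pvKeyLe_trans (t x y z : Int) : pvKeyLe t x y → pvKeyLe t y z → pvKeyLe t x z := by
  unfold pvKeyLe pvDif; omega
theorem pvKeyLe_total (t x y : Int) : pvKeyLe t x y ∨ pvKeyLe t y x := by unfold pvKeyLe pvDif; omega
theorem pvKeyLe_antisymm (t x y : Int) : pvKeyLe t x y → pvKeyLe t y x → x = y := by
  unfold pvKeyLe pvDif; omega

theorem exists_pvKeyMin (t : Int) (C : List Int) (h : C ≠ []) :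
    ∃ m ∈ C, ∀ y ∈ C, pvKeyLe t m y := by
  induction C with
  | nil => simp at h
  | cons a tl ih =>
    rcases eq_or_ne tl [] with rfl | htl
    · refine ⟨a, by simp, ?_⟩
      intro y hy; simp at hy; subst hy; exact pvKeyLe_refl _ _
    · obtain ⟨m, hm, hmin⟩ := ih htl
      rcases pvKeyLe_total t m a with hma | ham
      · refine ⟨m, by simp [hm], ?_⟩
        intro y hy; rcases List.mem_cons.mp hy with rfl | hy
        exacts [hma, hmin y hy]
      · refine ⟨a, by simp, ?_⟩
        intro y hy; rcases List.mem_cons.mp hy with rfl | hy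
        exacts [pvKeyLe_refl _ _, pvKeyLe_trans t a m y ham (hmin y hy)]

-- sets of key-smallest elements of a fixed size are unique up to permutation
theorem pvSelUnique (t : Int) : ∀ (n : Nat) (S1 S2 C R1 R2 : List Int),
    C.Perm (S1 ++ R1) → C.Perm (S2 ++ R2) → S1.length = n → S2.length = n →
    (∀ x ∈ S1, ∀ y ∈ R1, pvKeyLe t x y) → (∀ x ∈ S2, ∀ y ∈ R2, pvKeyLe t x y) →
    S1.Perm S2 := by
  intro n
  induction n with
  | zero =>
    intro S1 S2 _ _ _ _ _ h1 h2 _ _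
    rw [List.length_eq_zero_iff] at h1 h2; subst h1; subst h2; exact List.Perm.refl _
  | succ n ih =>
    intro S1 S2 C R1 R2 hp1 hp2 hl1 hl2 hd1 hd2
    have hC : C ≠ [] := by
      intro h; subst h
      have := hp1.length_eq; simp at this; omega
    obtain ⟨m, hmC, hmin⟩ := exists_pvKeyMin t C hC
    have hmS : ∀ (S R : List Int), C.Perm (S ++ R) → S.length = n + 1 →
        (∀ x ∈ S, ∀ y ∈ R, pvKeyLe t x y) → m ∈ S := by
      intro S R hp hl hd
      by_cases hm : m ∈ S
      · exact hm
      · have hmR : m ∈ R := by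
          have := (hp.mem_iff).mp hmC
          simp at this; tauto
        obtain ⟨x, hx⟩ := List.exists_mem_of_length_eq_add_one hl
        have hxC : x ∈ C := (hp.mem_iff).mpr (by simp [hx])
        have : x = m := pvKeyLe_antisymm t x m (hd x hx m hmR) (hmin x hxC)
        subst this; exact hx
    have hm1 := hmS S1 R1 hp1 hl1 hd1
    have hm2 := hmS S2 R2 hp2 hl2 hd2
    have e1 : S1.Perm (m :: S1.erase m) := List.perm_cons_erase hm1
    have e2 : S2.Perm (m :: S2.erase m) := List.perm_cons_erase hm2
    have hp1' : (C.erase m).Perm ((S1.erase m) ++ R1) := by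
      have h : C.Perm (m :: (S1.erase m ++ R1)) := hp1.trans (by simpa using e1.append_right R1)
      have := h.erase m
      simpa [List.erase_cons_head] using this
    have hp2' : (C.erase m).Perm ((S2.erase m) ++ R2) := by
      have h : C.Perm (m :: (S2.erase m ++ R2)) := hp2.trans (by simpa using e2.append_right R2)
      have := h.erase m
      simpa [List.erase_cons_head] using this
    have ihp := ih (S1.erase m) (S2.erase m) (C.erase m) R1 R2 hp1' hp2'
      (by rw [List.length_erase_of_mem hm1, hl1]; omega)
      (by rw [List.length_erase_of_mem hm2, hl2]; omega)
      (fun x hx y hy => hd1 x (List.mem_of_mem_erase hx) y hy)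
      (fun x hx y hy => hd2 x (List.mem_of_mem_erase hx) y hy)
    exact e1.trans ((ihp.cons m).trans e2.symm)

-- ---------- indexing helpers ----------

theorem pvEl_eq_getElem (xs : List Int) (i : Int) (h0 : 0 ≤ i) (h1 : i < xs.length) :
    pvEl xs i = xs[i.toNat]'(by omega) := by
  unfold pvEl
  rw [PySem.List.pyGet?_of_nonneg xs h0, List.getElem?_eq_getElem (by omega : i.toNat < xs.length)]
  rfl

theorem pvEl_mono (xs : List Int) (hs : xs.Pairwise (· ≤ ·)) (i j : Int)
    (h0 : 0 ≤ i) (hij : i ≤ j) (hj : j < xs.length) : pvEl xs i ≤ pvEl xs j := by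
  rw [pvEl_eq_getElem xs i h0 (by omega), pvEl_eq_getElem xs j (by omega) hj]
  rcases eq_or_lt_of_le hij with rfl | hlt
  · exact le_refl _
  · exact List.pairwise_iff_getElem.mp hs i.toNat j.toNat (by omega) (by omega) (by omega)

theorem pvGetD_nat (xs : List Int) (n : Nat) (h : n < xs.length) :
    xs.getD n 0 = pvEl xs (n : Int) := by
  rw [pvEl_eq_getElem xs (n : Int) (by omega) (by omega)]
  simp [List.getD_eq_getElem?_getD, List.getElem?_eq_getElem h]

theorem pvMem_take_idx (xs : List Int) (x : Int) (n : Nat) (h : x ∈ xs.take n) :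
    ∃ i : Nat, i < n ∧ i < xs.length ∧ pvEl xs (i : Int) = x := by
  rw [List.mem_take_iff_getElem] at h
  obtain ⟨i, hlt, he⟩ := h
  refine ⟨i, by omega, by omega, ?_⟩
  rw [pvEl_eq_getElem xs (i : Int) (by omega) (by omega)]
  simpa using he

theorem pvMem_drop_idx (xs : List Int) (x : Int) (n : Nat) (h : x ∈ xs.drop n) :
    ∃ i : Nat, n ≤ i ∧ i < xs.length ∧ pvEl xs (i : Int) = x := by
  obtain ⟨i, hlt, he⟩ := List.mem_iff_getElem.mp h
  have hlen : n + i < xs.length := by simp at hlt; omega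
  refine ⟨n + i, by omega, hlen, ?_⟩
  rw [pvEl_eq_getElem xs ((n + i : Nat) : Int) (by omega) (by omega)]
  have he2 : xs[n + i]'hlen = x := by rw [List.getElem_drop' hlen]; exact he
  simpa using he2

-- ---------- binary search characterization ----------

theorem binarySearchAux_spec (s : List Int) (t : Int) (hs : s.Pairwise (· ≤ ·)) :
    ∀ (n : Nat) (lo hi : Int), (hi - lo + 1).toNat ≤ n → 0 ≤ lo → lo ≤ hi + 1 → hi < (s.length : Int) →
    (lo ≤ binarySearchAux s lo hi t ∧ binarySearchAux s lo hi t ≤ hi + 1) ∧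
    (∀ i : Int, lo ≤ i → i < binarySearchAux s lo hi t → pvEl s i ≤ t) ∧
    (∀ i : Int, binarySearchAux s lo hi t ≤ i → i ≤ hi → t ≤ pvEl s i) ∧
    (binarySearchAux s lo hi t = hi + 1 → ∀ i : Int, lo ≤ i → i ≤ hi → pvEl s i < t) := by
  intro n
  induction n with
  | zero =>
    intro lo hi hn h0 hlohi hlen
    have hgt : lo > hi := by omega
    rw [binarySearchAux]; simp only [dif_pos hgt]
    refine ⟨⟨le_refl _, by omega⟩, ?_, ?_, ?_⟩
    · intro i h1 h2; omega
    · intro i h1 h2; omega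
    · intro he i h1 h2; omega
  | succ n ih =>
    intro lo hi hn h0 hlohi hlen
    by_cases hgt : lo > hi
    · rw [binarySearchAux]; simp only [dif_pos hgt]
      refine ⟨⟨le_refl _, by omega⟩, ?_, ?_, ?_⟩
      · intro i h1 h2; omega
      · intro i h1 h2; omega
      · intro he i h1 h2; omega
    · have hmid := PySem.Int.floordiv_two_mid_bounds (lo := lo) (hi := hi) (by omega)
      set half := PySem.Int.floordiv (lo + hi) 2 with hhalf
      by_cases hv : pvEl s half = t
      · have heq : binarySearchAux s lo hi t = half := by
          rw [binarySearchAux]; simp only [dif_neg hgt, ← hhalf, if_pos hv]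
        rw [heq]
        refine ⟨⟨by omega, by omega⟩, ?_, ?_, ?_⟩
        · intro i h1 h2
          calc pvEl s i ≤ pvEl s half := pvEl_mono s hs i half (by omega) (by omega) (by omega)
            _ = t := hv
        · intro i h1 h2
          calc t = pvEl s half := hv.symm
            _ ≤ pvEl s i := pvEl_mono s hs half i (by omega) (by omega) (by omega)
        · intro he; omega
      · by_cases hv2 : pvEl s half > t
        · have heq : binarySearchAux s lo hi t = binarySearchAux s lo (half - 1) t := by
            rw [binarySearchAux]; simp only [dif_neg hgt, ← hhalf, if_neg hv, if_pos hv2]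
          rw [heq]
          obtain ⟨⟨ih1, ih2⟩, ihl, ihr, ihs⟩ := ih lo (half - 1) (by omega) h0 (by omega) (by omega)
          refine ⟨⟨by omega, by omega⟩, ?_, ?_, ?_⟩
          · exact ihl
          · intro i h1 h2
            by_cases hc : i ≤ half - 1
            · exact ihr i h1 hc
            · calc t ≤ pvEl s half := le_of_lt hv2
                _ ≤ pvEl s i := pvEl_mono s hs half i (by omega) (by omega) (by omega)
          · intro he; omega
        · have heq : binarySearchAux s lo hi t = binarySearchAux s (half + 1) hi t := by
            rw [binarySearchAux]; simp only [dif_neg hgt, ← hhalf, if_neg hv, if_neg hv2]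
          rw [heq]
          have hvlt : pvEl s half < t := by omega
          obtain ⟨⟨ih1, ih2⟩, ihl, ihr, ihs⟩ := ih (half + 1) hi (by omega) (by omega) (by omega) hlen
          refine ⟨⟨by omega, by omega⟩, ?_, ?_, ?_⟩
          · intro i h1 h2
            by_cases hc : half + 1 ≤ i
            · exact ihl i hc h2
            · calc pvEl s i ≤ pvEl s half := pvEl_mono s hs i half (by omega) (by omega) (by omega)
                _ ≤ t := le_of_lt hvlt
          · exact ihr
          · intro he i h1 h2
            by_cases hc : half + 1 ≤ i
            · exact ihs he i hc h2
            · calc pvEl s i ≤ pvEl s half := pvEl_mono s hs i half (by omega) (by omega) (by omega)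
                _ < t := hvlt

-- ---------- pvCrem: membership and one-step decompositions ----------

theorem pvMem_crem (s : List Int) (t r lp rp : Int) (y : Int) (h : y ∈ pvCrem s t r lp rp) :
    |y - t| ≤ r ∧ ∃ i : Int, ((0 ≤ i ∧ i ≤ lp) ∨ (rp ≤ i ∧ i < (s.length : Int))) ∧ pvEl s i = y := by
  unfold pvCrem at h
  rw [List.mem_filter] at h
  obtain ⟨hmem, hin⟩ := h
  refine ⟨by simpa using hin, ?_⟩
  rcases List.mem_append.mp hmem with hl | hr
  · obtain ⟨i, hi1, hi2, hi3⟩ := pvMem_take_idx s y _ hl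
    exact ⟨(i : Int), Or.inl ⟨by omega, by omega⟩, hi3⟩
  · obtain ⟨i, hi1, hi2, hi3⟩ := pvMem_drop_idx s y _ hr
    refine ⟨(i : Int), Or.inr ⟨?_, by omega⟩, hi3⟩
    have : rp ≤ (rp.toNat : Int) := Int.self_le_toNat rp
    omega

theorem pvCrem_left_step (s : List Int) (t r lp rp : Int) (h0 : 0 ≤ lp) (h1 : lp < (s.length : Int))
    (hin : |pvEl s lp - t| ≤ r) :
    (pvCrem s t r lp rp).Perm (pvEl s lp :: pvCrem s t r (lp - 1) rp) := by
  unfold pvCrem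
  have htk : (lp + 1).toNat = lp.toNat + 1 := by omega
  have htk2 : (lp - 1 + 1).toNat = lp.toNat := by omega
  have hlt : lp.toNat < s.length := by omega
  have htake : s.take (lp + 1).toNat = s.take lp.toNat ++ [s[lp.toNat]] := by
    rw [htk, List.take_succ, List.getElem?_eq_getElem hlt]
    rfl
  rw [htake, htk2]
  have hel : pvEl s lp = s[lp.toNat]'hlt := pvEl_eq_getElem s lp h0 h1
  rw [List.append_assoc, List.filter_append, List.filter_append, List.filter_cons]
  simp only [← hel, hin, decide_true, if_pos, List.filter_nil, List.filter_append]
  exact List.perm_middle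

theorem pvCrem_right_step (s : List Int) (t r lp rp : Int) (h0 : 0 ≤ rp) (h1 : rp < (s.length : Int))
    (hin : |pvEl s rp - t| ≤ r) :
    (pvCrem s t r lp rp).Perm (pvEl s rp :: pvCrem s t r lp (rp + 1)) := by
  unfold pvCrem
  have hlt : rp.toNat < s.length := by omega
  have hdrop : s.drop rp.toNat = s[rp.toNat] :: s.drop (rp.toNat + 1) :=
    List.drop_eq_getElem_cons hlt
  have htk : (rp + 1).toNat = rp.toNat + 1 := by omega
  rw [hdrop, htk]
  have hel : pvEl s rp = s[rp.toNat]'hlt := pvEl_eq_getElem s rp h0 h1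
  rw [List.filter_append, List.filter_cons]
  simp only [← hel, hin, decide_true, if_pos]
  rw [List.filter_append]
  exact List.perm_middle

-- ---------- A's loop selects a key-minimal set of the remaining candidates ----------

theorem pvLoopSpec (s : List Int) (k r t : Int) (hs : s.Pairwise (· ≤ ·)) :
    ∀ (fuel : Nat) (acc : List Int) (lp rp : Int) (dl dr : Option Int),
    -1 ≤ lp → lp < rp → rp ≤ (s.length : Int) →
    (lp + 1).toNat + ((s.length : Int) - rp).toNat ≤ fuel →
    ((lp = -1 ∧ dl = none) ∨ (0 ≤ lp ∧ lp < (s.length : Int) ∧ dl = some |pvEl s lp - t|)) →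
    ((rp = (s.length : Int) ∧ dr = none) ∨ (rp < (s.length : Int) ∧ dr = some |pvEl s rp - t|)) →
    (∀ i : Int, 0 ≤ i → i ≤ lp → pvEl s i ≤ t) →
    (∀ i : Int, rp ≤ i → i < (s.length : Int) → t ≤ pvEl s i) →
    ∃ sel R : List Int,
      neighborsLoop s k r t acc lp rp dl dr fuel = acc ++ sel ∧
      (pvCrem s t r lp rp).Perm (sel ++ R) ∧
      sel.length = min (k - (acc.length : Int)).toNat (pvCrem s t r lp rp).length ∧
      (∀ x ∈ sel, ∀ y ∈ R, pvKeyLe t x y) := by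
  intro fuel
  induction fuel with
  | zero =>
    intro acc lp rp dl dr hlp hlr hrp hfuel hdl hdr hleft hright
    have h1 : lp = -1 := by omega
    have h2 : rp = (s.length : Int) := by omega
    have hC : pvCrem s t r lp rp = [] := by
      unfold pvCrem
      subst h1 h2
      simp
    refine ⟨[], [], by simp [neighborsLoop], by simp [hC], by simp [hC], by simp⟩
  | succ fuel ih =>
    intro acc lp rp dl dr hlp hlr hrp hfuel hdl hdr hleft hright
    by_cases hcond : ((acc.length : Int) < k) ∧ (pvLeR dl r || pvLeR dr r) = true
    · -- loop iterates
      by_cases hld : pvLeD dl dr = true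
      · -- left pick
        have hdl' : 0 ≤ lp ∧ lp < (s.length : Int) ∧ dl = some |pvEl s lp - t| := by
          rcases hdl with ⟨h1, h2⟩ | h
          · exfalso
            subst h2
            rcases hdr with ⟨h3, h4⟩ | ⟨h3, h4⟩
            · subst h4; simp [pvLeR] at hcond
            · subst h4; simp [pvLeD] at hld
          · exact h
        obtain ⟨hlp0, hlplen, hdleq⟩ := hdl'
        set x := pvEl s lp with hx
        have hdlr : |x - t| ≤ r := by
          rcases hdr with ⟨h3, h4⟩ | ⟨h3, h4⟩ <;> subst h4 <;>
            rcases hcond with ⟨hc1, hc2⟩ <;> rw [hdleq] at hc2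
          · simp [pvLeR] at hc2; exact hc2
          · simp [pvLeD, hdleq] at hld
            simp [pvLeR] at hc2
            rcases hc2 with h | h
            · exact h
            · omega
        have hstep : neighborsLoop s k r t acc lp rp dl dr (fuel + 1) =
            neighborsLoop s k r t (acc ++ [x]) (lp - 1) rp
              (if lp - 1 = -1 then none else some (getDifference s t (lp - 1))) dr fuel := by
          rw [neighborsLoop]
          rw [if_pos hcond, if_pos hld]
        have hperm1 : (pvCrem s t r lp rp).Perm (x :: pvCrem s t r (lp - 1) rp) :=
          pvCrem_left_step s t r lp rp hlp0 hlplen hdlr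
        obtain ⟨sel', R', heq', hperm', hlen', hdom'⟩ :=
          ih (acc ++ [x]) (lp - 1) rp
            (if lp - 1 = -1 then none else some (getDifference s t (lp - 1))) dr
            (by omega) (by omega) hrp (by omega)
            (by
              by_cases hc : lp - 1 = -1
              · left; exact ⟨hc, by rw [if_pos hc]⟩
              · right
                refine ⟨by omega, by omega, ?_⟩
                rw [if_neg hc]
                rfl)
            hdr
            (fun i h1 h2 => hleft i h1 (by omega))
            hright
        refine ⟨x :: sel', R', ?_, ?_, ?_, ?_⟩
        · rw [hstep, heq']
          simp
        · exact hperm1.trans (by simpa using (hperm'.cons x))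
        · have hl1 : (pvCrem s t r lp rp).length = (pvCrem s t r (lp - 1) rp).length + 1 := by
            have := hperm1.length_eq
            simpa using this
          have hacc : ((acc ++ [x]).length : Int) = (acc.length : Int) + 1 := by simp
          rw [hacc] at hlen'
          rcases hcond with ⟨hc1, _⟩
          simp only [List.length_cons, hlen', hl1]
          omega
        · intro a ha y hy
          rcases List.mem_cons.mp ha with rfl | ha'
          · -- a = x: x is key-minimal among remaining candidates
            have hyC : y ∈ pvCrem s t r (lp - 1) rp := by
              have : y ∈ sel' ++ R' := List.mem_append.mpr (Or.inr hy)
              exact hperm'.symm.subset this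
            obtain ⟨hyr, i, hi, hiel⟩ := pvMem_crem s t r (lp - 1) rp y hyC
            rcases hi with ⟨hi0, hi1⟩ | ⟨hi0, hi1⟩
            · -- y on the left of lp: farther from t
              have h1 : pvEl s i ≤ t := hleft i hi0 (by omega)
              have h2 : pvEl s lp ≤ t := hleft lp hlp0 (by omega)
              have h3 : pvEl s i ≤ pvEl s lp := pvEl_mono s hs i lp hi0 (by omega) (by omega)
              rw [← hiel]
              unfold pvKeyLe pvDif
              rw [hx]
              omega
            · -- y on the right of rp: dl ≤ dr ≤ dif y
              rcases hdr with ⟨h3, h4⟩ | ⟨h3, h4⟩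
              · omega
              · have h5 : t ≤ pvEl s rp := hright rp (by omega) h3
                have h6 : t ≤ pvEl s i := hright i hi0 hi1
                have h7 : pvEl s rp ≤ pvEl s i := pvEl_mono s hs rp i (by omega) hi0 hi1
                have h2 : pvEl s lp ≤ t := hleft lp hlp0 (by omega)
                have h8 : |pvEl s lp - t| ≤ |pvEl s rp - t| := by
                  rw [hdleq, h4] at hld
                  simpa [pvLeD] using hld
                rw [Int.abs_eq_natAbs, Int.abs_eq_natAbs] at h8
                rw [← hiel]
                unfold pvKeyLe pvDif
                rw [hx]
                omega
          · exact hdom' a ha' y hy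
      · -- right pick
        have hdr' : rp < (s.length : Int) ∧ dr = some |pvEl s rp - t| := by
          rcases hdr with ⟨h1, h2⟩ | h
          · exfalso
            subst h2
            rcases hdl with ⟨h3, h4⟩ | ⟨h3, h4, h5⟩
            · subst h4; simp [pvLeD] at hld
            · subst h5; simp [pvLeD] at hld
          · exact h
        obtain ⟨hrplen, hdreq⟩ := hdr'
        set x := pvEl s rp with hx
        have hdrr : |x - t| ≤ r := by
          rcases hcond with ⟨hc1, hc2⟩
          rcases hdl with ⟨h3, h4⟩ | ⟨h3, h4, h5⟩
          · subst h4
            rw [hdreq] at hc2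
            simp [pvLeR] at hc2; exact hc2
          · subst h5
            rw [hdreq] at hc2
            simp [pvLeD, hdreq] at hld
            simp [pvLeR] at hc2
            rcases hc2 with h | h
            · omega
            · exact h
        have hstep : neighborsLoop s k r t acc lp rp dl dr (fuel + 1) =
            neighborsLoop s k r t (acc ++ [x]) lp (rp + 1)
              dl (if rp + 1 = (s.length : Int) then none else some (getDifference s t (rp + 1))) fuel := by
          rw [neighborsLoop]
          rw [if_pos hcond, if_neg (by simpa using hld)]
        have hperm1 : (pvCrem s t r lp rp).Perm (x :: pvCrem s t r lp (rp + 1)) :=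
          pvCrem_right_step s t r lp rp (by omega) hrplen hdrr
        obtain ⟨sel', R', heq', hperm', hlen', hdom'⟩ :=
          ih (acc ++ [x]) lp (rp + 1)
            dl (if rp + 1 = (s.length : Int) then none else some (getDifference s t (rp + 1)))
            hlp (by omega) (by omega) (by omega)
            hdl
            (by
              by_cases hc : rp + 1 = (s.length : Int)
              · left; exact ⟨hc, by rw [if_pos hc]⟩
              · right
                refine ⟨by omega, ?_⟩
                rw [if_neg hc]
                rfl)
            hleft
            (fun i h1 h2 => hright i (by omega) h2)
        refine ⟨x :: sel', R', ?_, ?_, ?_, ?_⟩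
        · rw [hstep, heq']
          simp
        · exact hperm1.trans (by simpa using (hperm'.cons x))
        · have hl1 : (pvCrem s t r lp rp).length = (pvCrem s t r lp (rp + 1)).length + 1 := by
            have := hperm1.length_eq
            simpa using this
          have hacc : ((acc ++ [x]).length : Int) = (acc.length : Int) + 1 := by simp
          rw [hacc] at hlen'
          rcases hcond with ⟨hc1, _⟩
          simp only [List.length_cons, hlen', hl1]
          omega
        · intro a ha y hy
          rcases List.mem_cons.mp ha with rfl | ha'
          · have hyC : y ∈ pvCrem s t r lp (rp + 1) := by
              have : y ∈ sel' ++ R' := List.mem_append.mpr (Or.inr hy)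
              exact hperm'.symm.subset this
            obtain ⟨hyr, i, hi, hiel⟩ := pvMem_crem s t r lp (rp + 1) y hyC
            rcases hi with ⟨hi0, hi1⟩ | ⟨hi0, hi1⟩
            · -- y on the left: dr < dl ≤ dif y (strict)
              rcases hdl with ⟨h3, h4⟩ | ⟨h3, h4, h5⟩
              · omega
              · have h1 : pvEl s i ≤ t := hleft i hi0 hi1
                have h2 : pvEl s lp ≤ t := hleft lp (by omega) (le_refl lp)
                have h6 : pvEl s i ≤ pvEl s lp := pvEl_mono s hs i lp hi0 hi1 (by omega)
                have h7 : t ≤ pvEl s rp := hright rp (le_refl rp) hrplen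
                have h8 : ¬ |pvEl s lp - t| ≤ |pvEl s rp - t| := by
                  rw [hdreq] at hld
                  rw [h5] at hld
                  simpa [pvLeD] using hld
                rw [Int.abs_eq_natAbs, Int.abs_eq_natAbs] at h8
                rw [← hiel]
                unfold pvKeyLe pvDif
                rw [hx]
                omega
            · -- y on the right of rp + 1: farther from t
              have h1 : t ≤ pvEl s i := hright i (by omega) hi1
              have h2 : t ≤ pvEl s rp := hright rp (le_refl rp) hrplen
              have h3 : pvEl s rp ≤ pvEl s i := pvEl_mono s hs rp i (by omega) (by omega) hi1
              rw [← hiel]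
              unfold pvKeyLe pvDif
              rw [hx]
              omega
          · exact hdom' a ha' y hy
    · -- loop stops
      have hstep : neighborsLoop s k r t acc lp rp dl dr (fuel + 1) = acc := by
        rw [neighborsLoop, if_neg hcond]
      by_cases hk : (acc.length : Int) < k
      · -- both frontier distances out of range: no candidates remain
        have hb : (pvLeR dl r || pvLeR dr r) = false := by
          rcases h : (pvLeR dl r || pvLeR dr r) with _ | _
          · rfl
          · exact absurd ⟨hk, h⟩ hcond
        rw [Bool.or_eq_false_iff] at hb
        obtain ⟨hb1, hb2⟩ := hb
        have hC : pvCrem s t r lp rp = [] := by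
          rw [List.eq_nil_iff_forall_not_mem]
          intro y hy
          obtain ⟨hyr, i, hi, hiel⟩ := pvMem_crem s t r lp rp y hy
          rcases hi with ⟨hi0, hi1⟩ | ⟨hi0, hi1⟩
          · rcases hdl with ⟨h1, _⟩ | ⟨h1, h2, h3⟩
            · omega
            · rw [h3] at hb1
              simp [pvLeR] at hb1
              have ha1 : pvEl s i ≤ t := hleft i hi0 hi1
              have ha2 : pvEl s lp ≤ t := hleft lp h1 (le_refl lp)
              have ha3 : pvEl s i ≤ pvEl s lp := pvEl_mono s hs i lp hi0 hi1 (by omega)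
              rw [← hiel] at hyr
              rw [Int.abs_eq_natAbs] at hyr hb1
              omega
          · rcases hdr with ⟨h1, _⟩ | ⟨h1, h2⟩
            · omega
            · rw [h2] at hb2
              simp [pvLeR] at hb2
              have ha1 : t ≤ pvEl s i := hright i hi0 hi1
              have ha2 : t ≤ pvEl s rp := hright rp (le_refl rp) h1
              have ha3 : pvEl s rp ≤ pvEl s i := pvEl_mono s hs rp i (by omega) hi0 hi1
              rw [← hiel] at hyr
              rw [Int.abs_eq_natAbs] at hyr hb2
              omega
        refine ⟨[], [], by simpa using hstep, by simp [hC], by simp [hC], by simp⟩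
      · -- enough neighbors collected
        refine ⟨[], pvCrem s t r lp rp, by simpa using hstep, by simp, ?_, by simp⟩
        have : (k - (acc.length : Int)).toNat = 0 := by omega
        simp [this]

-- ---------- B's window shrink keeps a key-minimal window ----------

theorem pvShrinkSpec (cands : List Int) (t : Int) (k : Nat) (hs : cands.Pairwise (· ≤ ·)) :
    ∀ (fuel lo hi : Nat), lo ≤ hi → hi ≤ cands.length → hi - lo ≤ fuel →
    lo ≤ (shrinkWindow cands t k lo hi fuel).1 ∧
    (shrinkWindow cands t k lo hi fuel).1 ≤ (shrinkWindow cands t k lo hi fuel).2 ∧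
    (shrinkWindow cands t k lo hi fuel).2 ≤ hi ∧
    (shrinkWindow cands t k lo hi fuel).2 - (shrinkWindow cands t k lo hi fuel).1 = min k (hi - lo) ∧
    (∀ i j : Nat, (shrinkWindow cands t k lo hi fuel).1 ≤ i → i < (shrinkWindow cands t k lo hi fuel).2 →
      ((lo ≤ j ∧ j < (shrinkWindow cands t k lo hi fuel).1) ∨ ((shrinkWindow cands t k lo hi fuel).2 ≤ j ∧ j < hi)) →
      pvKeyLe t (pvEl cands (i : Int)) (pvEl cands (j : Int))) := by
  intro fuel
  induction fuel with
  | zero =>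
    intro lo hi hlohi hhilen hfuel
    have : hi = lo := by omega
    subst this
    rw [shrinkWindow]
    refine ⟨le_refl _, le_refl _, le_refl _, by omega, ?_⟩
    intro i j h1 h2 h3
    omega
  | succ fuel ih =>
    intro lo hi hlohi hhilen hfuel
    by_cases hk : k < hi - lo
    · have hlo : lo < hi := by omega
      have hgd1 : cands.getD lo 0 = pvEl cands (lo : Int) := pvGetD_nat cands lo (by omega)
      have hgd2 : cands.getD (hi - 1) 0 = pvEl cands ((hi - 1 : Nat) : Int) :=
        pvGetD_nat cands (hi - 1) (by omega)
      by_cases hgt : pvKeyGt t (cands.getD lo 0) (cands.getD (hi - 1) 0) = true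
      · have hstep : shrinkWindow cands t k lo hi (fuel + 1) = shrinkWindow cands t k (lo + 1) hi fuel := by
          rw [shrinkWindow, if_pos hk, if_pos hgt]
        rw [hstep]
        obtain ⟨ih1, ih2, ih3, ih4, ih5⟩ := ih (lo + 1) hi (by omega) hhilen (by omega)
        refine ⟨by omega, ih2, ih3, by omega, ?_⟩
        intro i j h1 h2 h3
        have hkey : ((pvEl cands ((hi - 1 : Nat) : Int)) - t).natAbs < ((pvEl cands (lo : Int)) - t).natAbs ∨
            (((pvEl cands (lo : Int)) - t).natAbs = ((pvEl cands ((hi - 1 : Nat) : Int)) - t).natAbs ∧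
              pvEl cands ((hi - 1 : Nat) : Int) < pvEl cands (lo : Int)) := by
          rw [hgd1, hgd2] at hgt
          unfold pvKeyGt at hgt
          simpa using hgt
        by_cases hj : j = lo
        · subst hj
          have hv1 : pvEl cands (j : Int) ≤ pvEl cands (i : Int) :=
            pvEl_mono cands hs _ _ (by omega) (by exact_mod_cast Int.ofNat_le.mpr (by omega)) (by push_cast; omega)
          have hv2 : pvEl cands (i : Int) ≤ pvEl cands ((hi - 1 : Nat) : Int) :=
            pvEl_mono cands hs _ _ (by omega) (by exact_mod_cast Int.ofNat_le.mpr (by omega)) (by push_cast; omega)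
          unfold pvKeyLe pvDif
          omega
        · exact ih5 i j h1 h2 (by omega)
      · have hstep : shrinkWindow cands t k lo hi (fuel + 1) = shrinkWindow cands t k lo (hi - 1) fuel := by
          rw [shrinkWindow, if_pos hk, if_neg hgt]
        rw [hstep]
        obtain ⟨ih1, ih2, ih3, ih4, ih5⟩ := ih lo (hi - 1) (by omega) (by omega) (by omega)
        refine ⟨ih1, ih2, by omega, by omega, ?_⟩
        intro i j h1 h2 h3
        have hkey : ¬ (((pvEl cands ((hi - 1 : Nat) : Int)) - t).natAbs < ((pvEl cands (lo : Int)) - t).natAbs ∨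
            (((pvEl cands (lo : Int)) - t).natAbs = ((pvEl cands ((hi - 1 : Nat) : Int)) - t).natAbs ∧
              pvEl cands ((hi - 1 : Nat) : Int) < pvEl cands (lo : Int))) := by
          rw [hgd1, hgd2] at hgt
          unfold pvKeyGt at hgt
          simpa using hgt
        by_cases hj : j = hi - 1
        · subst hj
          have hv1 : pvEl cands (lo : Int) ≤ pvEl cands (i : Int) :=
            pvEl_mono cands hs _ _ (by omega) (by exact_mod_cast Int.ofNat_le.mpr (by omega)) (by push_cast; omega)
          have hv2 : pvEl cands (i : Int) ≤ pvEl cands ((hi - 1 : Nat) : Int) :=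
            pvEl_mono cands hs _ _ (by omega) (by exact_mod_cast Int.ofNat_le.mpr (by omega)) (by push_cast; omega)
          unfold pvKeyLe pvDif
          omega
        · exact ih5 i j h1 h2 (by omega)
    · rw [shrinkWindow, if_neg hk]
      refine ⟨le_refl _, hlohi, le_refl _, by omega, ?_⟩
      intro i j h1 h2 h3
      omega

-- ---------- window membership helper ----------

theorem pvMem_window_idx (cands : List Int) (x : Int) (lo hi : Nat) (hhi : hi ≤ cands.length)
    (h : x ∈ (cands.drop lo).take (hi - lo)) :
    ∃ i : Nat, lo ≤ i ∧ i < hi ∧ pvEl cands (i : Int) = x := by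
  obtain ⟨i', h1, h2, h3⟩ := pvMem_take_idx (cands.drop lo) x (hi - lo) h
  have hlen : lo + i' < cands.length := by simp at h2; omega
  refine ⟨lo + i', by omega, by omega, ?_⟩
  rw [pvEl_eq_getElem cands ((lo + i' : Nat) : Int) (by omega) (by exact_mod_cast hlen)]
  rw [pvEl_eq_getElem (cands.drop lo) (i' : Nat) (by omega) (by exact_mod_cast h2)] at h3
  simp only [Int.toNat_natCast] at h3 ⊢
  rw [List.getElem_drop' hlen]
  exact h3

-- ---------- main equivalence ----------

theorem pvMainEq (arr : List Int) (k r t : Int) (hpre : ∃ x ∈ arr, t ≤ x) :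
    findClosestNeighbors arr k r t = findClosestNeighbors_alt arr k r t := by
  classical
  -- shared notation
  set pred : Int → Bool := fun x => decide (|x - t| ≤ r) with hpred
  set s := PySem.List.sorted arr (fun x => x) false with hsdef
  have hsperm : s.Perm arr := PySem.List.sorted_perm _ _ _
  have hs : s.Pairwise (· ≤ ·) := by
    have := PySem.List.sorted_pairwise (xs := arr) (key := fun x : Int => x)
    simpa using this
  -- A returns within bounds
  obtain ⟨x0, hx0, hx0t⟩ := hpre
  have hx0s : x0 ∈ s := hsperm.mem_iff.mpr hx0
  have hlen1 : 1 ≤ s.length := by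
    have hne := List.ne_nil_of_mem hx0s
    have := List.length_pos_iff.mpr hne
    omega
  set idx := modifiedBinarySearch s t with hidx
  have hbs := binarySearchAux_spec s t hs s.length 0 ((s.length : Int) - 1) (by omega) (by omega)
    (by omega) (by omega)
  rw [show binarySearchAux s 0 ((s.length : Int) - 1) t = idx from rfl] at hbs
  obtain ⟨⟨hb0, hb1⟩, hbl, hbr, hbs'⟩ := hbs
  have hidxlt : idx < (s.length : Int) := by
    by_contra hcon
    have he : idx = (s.length : Int) := by omega
    obtain ⟨i, hi, hie⟩ := List.mem_iff_getElem.mp hx0s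
    have : pvEl s (i : Int) < t := by
      refine hbs' (by omega) (i : Int) (by omega) (by omega)
    rw [pvEl_eq_getElem s (i : Int) (by omega) (by omega)] at this
    simp only [Int.toNat_natCast] at this
    omega
  -- run the loop characterization
  obtain ⟨sel, R, hAeq, hAperm, hAlen, hAdom⟩ :=
    pvLoopSpec s k r t hs s.length [] (idx - 1) idx
      (if idx - 1 ≥ 0 then some (getDifference s t (idx - 1)) else none)
      (some (getDifference s t idx))
      (by omega) (by omega) (by omega) (by omega)
      (by
        by_cases hc : idx - 1 ≥ 0
        · right
          refine ⟨by omega, by omega, ?_⟩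
          rw [if_pos hc]
          rfl
        · left
          exact ⟨by omega, by rw [if_neg hc]⟩)
      (by
        right
        exact ⟨hidxlt, rfl⟩)
      (by
        intro i h1 h2
        exact hbl i h1 (by omega))
      (by
        intro i h1 h2
        exact hbr i h1 (by omega))
  have hCs : pvCrem s t r (idx - 1) idx = s.filter pred := by
    unfold pvCrem
    have h1 : (idx - 1 + 1).toNat = idx.toNat := by omega
    rw [h1, List.take_append_drop]
  rw [hCs] at hAperm hAlen
  -- A's result
  have hA : findClosestNeighbors arr k r t = PySem.List.sorted sel (fun x => x) false := by
    rw [findClosestNeighbors]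
    rw [← hsdef, ← hidx, hAeq, List.nil_append]
  -- B's side
  set cands := PySem.List.sorted (arr.filter pred) (fun x => x) false with hcdef
  have hcperm : cands.Perm (arr.filter pred) := PySem.List.sorted_perm _ _ _
  have hcpair : cands.Pairwise (· ≤ ·) := by
    have := PySem.List.sorted_pairwise (xs := arr.filter pred) (key := fun x : Int => x)
    simpa using this
  have hfperm : (arr.filter pred).Perm (s.filter pred) := (hsperm.symm).filter pred
  set K := (max 0 k).toNat with hK
  obtain ⟨hs1, hs2, hs3, hs4, hs5⟩ :=
    pvShrinkSpec cands t K hcpair cands.length 0 cands.length (by omega) (le_refl _) (by omega)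
  set lo := (shrinkWindow cands t K 0 cands.length cands.length).1 with hlo
  set hi := (shrinkWindow cands t K 0 cands.length cands.length).2 with hhi
  set mid := (cands.drop lo).take (hi - lo) with hmid
  have hB : findClosestNeighbors_alt arr k r t = mid := by
    rw [findClosestNeighbors_alt]
    rw [← hcdef, ← hK, ← hlo, ← hhi]
    rw [PySem.List.slice_natCast]
  -- decompose cands around the window
  have hdecomp : cands = cands.take lo ++ (mid ++ cands.drop hi) := by
    rw [hmid]
    conv_lhs => rw [← List.take_append_drop lo cands]
    congr 1
    conv_lhs => rw [← List.take_append_drop (hi - lo) (cands.drop lo)]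
    congr 1
    rw [List.drop_drop]
    congr 1
    omega
  have hBperm : cands.Perm (mid ++ (cands.take lo ++ cands.drop hi)) := by
    conv_lhs => rw [hdecomp]
    simpa [List.append_assoc] using
      ((List.perm_append_comm (l₁ := cands.take lo) (l₂ := mid)).append_right (cands.drop hi))
  -- equal selection sizes
  have hcands_len : cands.length = (s.filter pred).length := by
    rw [hcperm.length_eq, hfperm.length_eq]
  simp only [List.length_nil, Nat.cast_zero, sub_zero] at hAlen
  have hmidlen : mid.length = sel.length := by
    have h1 : mid.length = hi - lo := by
      rw [hmid]
      simp only [List.length_take, List.length_drop]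
      omega
    rw [h1, hs4, hcands_len, hAlen]
    omega
  -- B's window dominates its complement in the key order
  have hBdom : ∀ x ∈ mid, ∀ y ∈ (cands.take lo ++ cands.drop hi), pvKeyLe t x y := by
    intro x hx y hy
    obtain ⟨i, hi1, hi2, hie⟩ := pvMem_window_idx cands x lo hi hs3 (by rw [← hmid]; exact hx)
    rcases List.mem_append.mp hy with hyl | hyr
    · obtain ⟨j, hj1, hj2, hje⟩ := pvMem_take_idx cands y lo hyl
      rw [← hie, ← hje]
      exact hs5 i j hi1 hi2 (Or.inl ⟨by omega, hj1⟩)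
    · obtain ⟨j, hj1, hj2, hje⟩ := pvMem_drop_idx cands y hi hyr
      rw [← hie, ← hje]
      exact hs5 i j hi1 hi2 (Or.inr ⟨hj1, hj2⟩)
  -- both selections are key-minimal of the same candidate multiset, hence permutations
  have hperm2 : (s.filter pred).Perm (mid ++ (cands.take lo ++ cands.drop hi)) :=
    (hfperm.symm.trans hcperm.symm).trans hBperm
  have hselperm : sel.Perm mid :=
    pvSelUnique t sel.length sel mid (s.filter pred) R (cands.take lo ++ cands.drop hi)
      hAperm hperm2 rfl hmidlen hAdom hBdom
  have hmidpair : mid.Pairwise (· ≤ ·) := by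
    have hsub : mid.Sublist cands := (List.take_sublist _ _).trans (List.drop_sublist _ _)
    exact hcpair.sublist hsub
  rw [hA, hB]
  exact PySem.List.sorted_id_eq_of_perm_of_pairwise sel mid hselperm.symm hmidpair

-- ===== VERDICT (by name: the statement is the Claim_ definition above) =====
theorem findClosestNeighbors_spec : Claim_equal_findClosestNeighbors := by
  intro arr num_neighbors max_range toSearch _ hpre
  unfold Spec_findClosestNeighbors
  exact pvMainEq arr num_neighbors max_range toSearch hpre
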